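-- pv_equiv track=rewrite | github.com/EntoSanchez/yuri-draft-league | app.py | _bracket_seeding
-- ===== SOURCE A (Python) =====
-- def _bracket_seeding(size):
--     """Standard single-elimination seeding order for a power-of-2 bracket."""
--     if size == 2:
--         return [1, 2]
--     prev = _bracket_seeding(size // 2)
--     result = []
--     for s in prev:
--         result.append(s)
--         result.append(size + 1 - s)
--     return result
-- ===== SOURCE B (Python) =====
-- def _bracket_seeding(size):
--     """Standard single-elimination seeding order for a power-of-2 bracket."""
--     levels = []
--     n = size
--     while n > 2:
--         levels.append(n)
--         n //= 2
--     if n != 2: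
--         raise ValueError("bracket size does not reduce to a 2-player base")
--     result = [1, 2]
--     for level in reversed(levels):
--         result = [x for s in result for x in (s, level + 1 - s)]
--     return result
-- ===== Notes on version B (the rewrite author's own statement) =====
-- stated objective: alternative
-- what changed: Replaces A's top-down recursion on size//2 by an explicit iterative two-phase algorithm: a loop collects the halving chain of levels (raising ValueError if it does not bottom out at 2, mirroring where A's recursion diverges), then a loop folds the seeding list bottom-up from [1, 2] through those levels; no recursion at all.
-- outside the precondition, e.g. on _bracket_seeding(3): A raises RecursionError, B raises ValueError
import Mathlib
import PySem

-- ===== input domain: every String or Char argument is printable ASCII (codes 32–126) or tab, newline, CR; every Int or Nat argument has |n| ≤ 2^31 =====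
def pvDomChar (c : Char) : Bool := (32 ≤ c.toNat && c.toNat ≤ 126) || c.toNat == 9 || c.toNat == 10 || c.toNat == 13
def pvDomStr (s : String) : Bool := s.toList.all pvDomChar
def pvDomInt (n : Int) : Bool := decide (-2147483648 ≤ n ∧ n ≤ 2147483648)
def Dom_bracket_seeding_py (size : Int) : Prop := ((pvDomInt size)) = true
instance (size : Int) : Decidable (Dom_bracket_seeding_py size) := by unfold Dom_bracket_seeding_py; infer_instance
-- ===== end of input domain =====

-- B replaces A's top-down recursion by an iterative two-phase algorithm (collect the halving-chain levels, then fold the seeding bottom-up); objective: alternative decomposition, same cost.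

-- ===== PORT A =====
-- the 'for s in prev: result.append(s); result.append(size + 1 - s)' loop of A
def pvExpandA (size : Int) (prev : List Int) : List Int :=
  prev.foldl (fun acc s => acc ++ [s, size + 1 - s]) []

-- Python A recurses on size // 2; on inputs where that recursion never reaches 2
-- Python raises RecursionError — the 'size ≤ 2' guard below only makes the port
-- total there (those inputs are outside Pre_).
def bracket_seeding_py (size : Int) : List Int :=
  if size = 2 then [1, 2]
  else if size ≤ 2 then []
  else pvExpandA size (bracket_seeding_py (PySem.Int.floordiv size 2))
termination_by size.toNat
decreasing_by
  rw [PySem.Int.floordiv_eq_ediv_of_pos (by omega : (0:Int) < 2)]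
  omega

-- ===== PORT B =====
-- the 'while n > 2: levels.append(n); n //= 2' loop of B: returns the final n and levels
def pvLevelsLoop (n : Int) (levels : List Int) : Int × List Int :=
  if 2 < n then pvLevelsLoop (PySem.Int.floordiv n 2) (levels ++ [n]) else (n, levels)
termination_by n.toNat
decreasing_by
  rw [PySem.Int.floordiv_eq_ediv_of_pos (by omega : (0:Int) < 2)]
  omega

def bracket_seeding_py_alt (size : Int) : List Int :=
  let p := pvLevelsLoop size []
  if p.1 = 2 then
    p.2.reverse.foldl (fun result level => result.flatMap (fun s => [s, level + 1 - s])) [1, 2]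
  else []  -- Python B raises ValueError here (outside Pre_)

-- ===== PRECONDITION & SPEC =====
-- Pre_: exactly the sizes on which Python A returns — those whose repeated floor-halving
-- hits exactly 2, i.e. the intervals [2^(j+1), 3*2^j); on any other size A's recursion
-- never reaches the base case and raises RecursionError (B raises ValueError there).
-- (j ≤ 30 is no restriction inside Dom, where size ≤ 2^31.)
def Pre_bracket_seeding_py (size : Int) : Prop :=
  ∃ j : Nat, j ≤ 30 ∧ 2 * 2 ^ j ≤ size ∧ size < 3 * 2 ^ j

instance (size : Int) : Decidable (Pre_bracket_seeding_py size) := by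
  unfold Pre_bracket_seeding_py; infer_instance

def pvWitness_bracket_seeding_py : Int := (8)

def Spec_bracket_seeding_py (size : Int) (out : List Int) : Prop := out = bracket_seeding_py_alt size
instance (size : Int) (out : List Int) : Decidable (Spec_bracket_seeding_py size out) := by unfold Spec_bracket_seeding_py; infer_instance

-- ===== CLAIM (what is proved, stated in full; the proofs are below) =====
def Claim_equal_bracket_seeding_py : Prop := ∀ (size : Int), Dom_bracket_seeding_py size → Pre_bracket_seeding_py size → Spec_bracket_seeding_py size (bracket_seeding_py size)

-- ===== LEMMAS AND PROOFS =====

lemma pvLevelsLoop_stop (n : Int) (h : ¬ 2 < n) (acc : List Int) :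
    pvLevelsLoop n acc = (n, acc) := by
  rw [pvLevelsLoop, if_neg h]

-- the accumulator of the level-collecting loop can be pulled out front
lemma pvLevelsLoop_acc (N : Nat) : ∀ (n : Int), n.toNat ≤ N → ∀ (acc : List Int),
    pvLevelsLoop n acc = ((pvLevelsLoop n []).1, acc ++ (pvLevelsLoop n []).2) := by
  induction N with
  | zero =>
    intro n hn acc
    rw [pvLevelsLoop_stop n (by omega), pvLevelsLoop_stop n (by omega)]
    simp
  | succ N ih =>
    intro n hn acc
    by_cases h2 : 2 < n
    · have hd : (PySem.Int.floordiv n 2).toNat ≤ N := by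
        rw [PySem.Int.floordiv_eq_ediv_of_pos (by omega : (0:Int) < 2)]; omega
      rw [pvLevelsLoop, if_pos h2, ih _ hd]
      conv_rhs => rw [pvLevelsLoop, if_pos h2, ih _ hd]
      simp
    · rw [pvLevelsLoop_stop n h2, pvLevelsLoop_stop n h2]
      simp

lemma pvLevelsLoop_step (n : Int) (h2 : 2 < n) :
    pvLevelsLoop n [] =
      ((pvLevelsLoop (PySem.Int.floordiv n 2) []).1,
       n :: (pvLevelsLoop (PySem.Int.floordiv n 2) []).2) := by
  rw [pvLevelsLoop, if_pos h2,
    pvLevelsLoop_acc (PySem.Int.floordiv n 2).toNat _ le_rfl]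
  simp

-- A's append-fold is the flatMap B uses
lemma pvExpandA_flatMap (size : Int) (prev : List Int) :
    pvExpandA size prev = prev.flatMap (fun s => [s, size + 1 - s]) := by
  unfold pvExpandA
  induction prev using List.reverseRecOn with
  | nil => rfl
  | append_singleton xs x ih => simp [List.foldl_append, ih]

-- main invariant: on the interval [2^(j+1), 3*2^j) B's loop bottoms out at 2 and
-- the two programs agree
lemma pvBracket_eq (j : Nat) : ∀ (size : Int),
    2 ^ (j + 1) ≤ size → size < 3 * 2 ^ j →
    (pvLevelsLoop size []).1 = 2 ∧
    bracket_seeding_py size = bracket_seeding_py_alt size := by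
  induction j with
  | zero =>
    intro size h1 h2
    have hs : size = 2 := by norm_num at h1 h2; omega
    subst hs
    have hl : pvLevelsLoop 2 [] = (2, []) := pvLevelsLoop_stop 2 (by norm_num) []
    refine ⟨by rw [hl], ?_⟩
    rw [bracket_seeding_py, if_pos rfl]
    unfold bracket_seeding_py_alt
    rw [hl]
    rfl
  | succ j ih =>
    intro size h1 h2
    have hpe : (2:Int) ^ (j + 1 + 1) = 4 * 2 ^ j := by ring
    have hpe' : (2:Int) ^ (j + 1) = 2 * 2 ^ j := by ring
    have hp : (0:Int) < 2 ^ j := by positivity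
    rw [hpe] at h1
    have hgt : (2:Int) < size := by omega
    have hfd : PySem.Int.floordiv size 2 = size / 2 :=
      PySem.Int.floordiv_eq_ediv_of_pos (by omega)
    have hb1 : 2 ^ (j + 1) ≤ PySem.Int.floordiv size 2 := by rw [hfd, hpe']; omega
    have hb2 : PySem.Int.floordiv size 2 < 3 * 2 ^ j := by rw [hfd]; omega
    obtain ⟨h2f, heq⟩ := ih _ hb1 hb2
    have hstep := pvLevelsLoop_step size hgt
    constructor
    · rw [hstep, h2f]
    · -- A-side step
      rw [bracket_seeding_py, if_neg (by omega), if_neg (by omega),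
        pvExpandA_flatMap, heq]
      -- B-side step
      show (bracket_seeding_py_alt (PySem.Int.floordiv size 2)).flatMap
            (fun s => [s, size + 1 - s]) = bracket_seeding_py_alt size
      unfold bracket_seeding_py_alt
      rw [hstep, h2f]
      rw [if_pos h2f]
      simp [List.foldl_append]

-- ===== VERDICT (by name: the statement is the Claim_ definition above) =====
theorem bracket_seeding_py_spec : Claim_equal_bracket_seeding_py := by
  intro size _ hpre
  obtain ⟨j, _, h1, h2⟩ := hpre
  exact (pvBracket_eq j size (by rw [pow_succ, mul_comm]; exact h1) h2).2
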